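-- pv_equiv track=rewrite | github.com/MaxKlat29/REG_ML_BERT | src/data/bio_converter.py | validate_bio_roundtrip
-- ===== SOURCE A (Python) =====
-- LABEL_B_REF = 1
--
-- LABEL_I_REF = 2
--
-- def validate_bio_roundtrip(
--     text: str,
--     spans: list[tuple[int, int]],
--     encoding: dict,
--     offsets: list[tuple[int, int]],
-- ) -> bool:
--     """Reconstruct spans from BIO labels + offset mapping and compare to original.
--
--     Args:
--         text: Original text (unused for reconstruction but kept for signature).
--         spans: Expected (ground-truth) char spans.
--         encoding: dict returned by char_spans_to_bio (must contain 'labels').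
--         offsets: offset_mapping from the tokenizer encoding.
--
--     Returns:
--         True if reconstructed spans match original spans exactly.
--     """
--     labels = encoding["labels"]
--
--     reconstructed: list[tuple[int, int]] = []
--     current_start: int | None = None
--     current_end: int | None = None
--
--     for (tok_start, tok_end), label in zip(offsets, labels):
--         if label == LABEL_B_REF:
--             # Emit previous span if any
--             if current_start is not None:
--                 reconstructed.append((current_start, current_end))
--             current_start = tok_start
--             current_end = tok_end
--         elif label == LABEL_I_REF:
--             if current_start is not None:
--                 current_end = tok_end
--             # else: I-REF without preceding B-REF — malformed, ignore
--         else: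
--             # End of span (O, IGNORE, etc.)
--             if current_start is not None:
--                 reconstructed.append((current_start, current_end))
--                 current_start = None
--                 current_end = None
--
--     # Don't forget last open span
--     if current_start is not None:
--         reconstructed.append((current_start, current_end))
--
--     return reconstructed == list(spans)
-- ===== SOURCE B (Python) =====
-- LABEL_B_REF = 1
--
-- LABEL_I_REF = 2
--
--
-- def validate_bio_roundtrip(text, spans, encoding, offsets):
--     labels = encoding["labels"]
--     n = min(len(offsets), len(labels))
--     reconstructed = []
--     i = 0
--     while i < n:
--         if labels[i] == LABEL_B_REF:
--             start, end = offsets[i]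
--             j = i + 1
--             while j < n and labels[j] == LABEL_I_REF:
--                 end = offsets[j][1]
--                 j += 1
--             reconstructed.append((start, end))
--             i = j
--         else:
--             i += 1
--     return reconstructed == list(spans)
-- ===== Notes on version B (the rewrite author's own statement) =====
-- stated objective: simpler
-- what changed: Replaces A's single-pass state machine (Option current-span state, deferred emission, end-of-loop flush) by an index scan bounded by min(len(offsets),len(labels)) that, at each B label, runs an inner loop consuming the following I labels and appends the completed span immediately, so no open-span state or final flush exists.
import Mathlib
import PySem

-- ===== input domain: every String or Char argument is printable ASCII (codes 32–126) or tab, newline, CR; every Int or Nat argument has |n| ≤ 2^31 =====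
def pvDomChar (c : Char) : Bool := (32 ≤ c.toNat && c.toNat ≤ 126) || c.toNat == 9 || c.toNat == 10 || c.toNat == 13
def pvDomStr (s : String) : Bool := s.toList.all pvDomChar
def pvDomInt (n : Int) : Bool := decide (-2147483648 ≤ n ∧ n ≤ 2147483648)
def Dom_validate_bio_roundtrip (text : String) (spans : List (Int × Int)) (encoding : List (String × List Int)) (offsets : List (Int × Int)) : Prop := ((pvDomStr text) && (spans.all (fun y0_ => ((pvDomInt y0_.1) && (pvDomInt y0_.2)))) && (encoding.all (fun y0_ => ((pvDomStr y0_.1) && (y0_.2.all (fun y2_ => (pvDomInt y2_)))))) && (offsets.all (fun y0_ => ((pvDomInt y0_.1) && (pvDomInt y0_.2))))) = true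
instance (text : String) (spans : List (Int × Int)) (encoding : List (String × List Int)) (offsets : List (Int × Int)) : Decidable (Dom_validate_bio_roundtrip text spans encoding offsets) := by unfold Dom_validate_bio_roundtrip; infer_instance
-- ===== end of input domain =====

-- ===== PORT A =====
-- Header: B replaces A's deferred open-span state machine by a two-level index scan
-- (outer scan finds B labels, inner loop consumes the following I labels); objective: simpler.

-- A's loop body over zip(offsets, labels): state = (reconstructed, current span or none)
-- (current_start/current_end are set and cleared together in A, so they are one Option pair).
def stepA (st : List (Int × Int) × Option (Int × Int)) (x : (Int × Int) × Int) :
    List (Int × Int) × Option (Int × Int) :=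
  if x.2 = 1 then
    ((match st.2 with
      | some c => st.1 ++ [c]
      | none => st.1), some (x.1.1, x.1.2))
  else if x.2 = 2 then
    (st.1, match st.2 with
      | some c => some (c.1, x.1.2)
      | none => none)
  else
    match st.2 with
    | some c => (st.1 ++ [c], none)
    | none => (st.1, none)

def validate_bio_roundtrip (text : String) (spans : List (Int × Int)) (encoding : List (String × List Int)) (offsets : List (Int × Int)) : Bool :=
  match List.lookup "labels" encoding with
  | none => false  -- KeyError in Python; excluded by Pre_
  | some labels =>
    let st := (offsets.zip labels).foldl stepA ([], none)
    let reconstructed := match st.2 with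
      | some c => st.1 ++ [c]
      | none => st.1
    reconstructed == spans

-- ===== PORT B =====
-- inner while loop: extend `ed` over consecutive labels == 2, return (end, next index)
def innerB (offsets : List (Int × Int)) (labels : List Int) (n : Nat) (ed : Int) (j : Nat) : Int × Nat :=
  if h : j < n ∧ labels.getD j 0 = 2 then
    innerB offsets labels n (offsets.getD j (0, 0)).2 (j + 1)
  else (ed, j)
termination_by n - j
decreasing_by exact Nat.sub_succ_lt_self n j h.1

theorem innerB_ge (offsets : List (Int × Int)) (labels : List Int) (n : Nat) (ed : Int) (j : Nat) :
    j ≤ (innerB offsets labels n ed j).2 := by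
  fun_induction innerB with
  | case1 => omega
  | case2 => simp

-- outer while loop over i < n
def outerB (offsets : List (Int × Int)) (labels : List Int) (n : Nat) (acc : List (Int × Int)) (i : Nat) : List (Int × Int) :=
  if h : i < n then
    if labels.getD i 0 = 1 then
      let st := offsets.getD i (0, 0)
      let r := innerB offsets labels n st.2 (i + 1)
      outerB offsets labels n (acc ++ [(st.1, r.1)]) r.2
    else
      outerB offsets labels n acc (i + 1)
  else acc
termination_by n - i
decreasing_by
  · exact Nat.sub_lt_sub_left h (Nat.lt_of_lt_of_le (Nat.lt_succ_self i)
      (innerB_ge offsets labels n (offsets.getD i (0, 0)).2 (i + 1)))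
  · exact Nat.sub_succ_lt_self n i h

def validate_bio_roundtrip_alt (text : String) (spans : List (Int × Int)) (encoding : List (String × List Int)) (offsets : List (Int × Int)) : Bool :=
  match List.lookup "labels" encoding with
  | none => false  -- KeyError in Python; excluded by Pre_
  | some labels =>
    outerB offsets labels (min offsets.length labels.length) [] 0 == spans

-- ===== PRECONDITION & SPEC =====
-- Pre_ excludes exactly the inputs where Python raises KeyError: encoding lacking the key "labels".
def Pre_validate_bio_roundtrip (text : String) (spans : List (Int × Int)) (encoding : List (String × List Int)) (offsets : List (Int × Int)) : Prop :=
  (List.lookup "labels" encoding).isSome = true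
instance (text : String) (spans : List (Int × Int)) (encoding : List (String × List Int)) (offsets : List (Int × Int)) : Decidable (Pre_validate_bio_roundtrip text spans encoding offsets) := by unfold Pre_validate_bio_roundtrip; infer_instance

def pvWitness_validate_bio_roundtrip : String × (List (Int × Int)) × (List (String × List Int)) × (List (Int × Int)) :=
  ("ref", [(0, 3)], [("labels", [1, 2])], [(0, 1), (1, 3)])

def Spec_validate_bio_roundtrip (text : String) (spans : List (Int × Int)) (encoding : List (String × List Int)) (offsets : List (Int × Int)) (out : Bool) : Prop := out = validate_bio_roundtrip_alt text spans encoding offsets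
instance (text : String) (spans : List (Int × Int)) (encoding : List (String × List Int)) (offsets : List (Int × Int)) (out : Bool) : Decidable (Spec_validate_bio_roundtrip text spans encoding offsets out) := by unfold Spec_validate_bio_roundtrip; infer_instance

-- ===== CLAIM (what is proved, stated in full; the proofs are below) =====
def Claim_equal_validate_bio_roundtrip : Prop := ∀ (text : String) (spans : List (Int × Int)) (encoding : List (String × List Int)) (offsets : List (Int × Int)), Dom_validate_bio_roundtrip text spans encoding offsets → Pre_validate_bio_roundtrip text spans encoding offsets → Spec_validate_bio_roundtrip text spans encoding offsets (validate_bio_roundtrip text spans encoding offsets)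

-- ===== LEMMAS AND PROOFS =====

def flushA (st : List (Int × Int) × Option (Int × Int)) : List (Int × Int) :=
  match st.2 with
  | some c => st.1 ++ [c]
  | none => st.1

-- the joint loop correspondence, by induction on the remaining length n - i
theorem scan_corr (offsets : List (Int × Int)) (labels : List Int)
    (k : Nat) :
    (∀ i acc, min offsets.length labels.length - i ≤ k →
      flushA (((offsets.zip labels).drop i).foldl stepA (acc, none)) =
        outerB offsets labels (min offsets.length labels.length) acc i) ∧
    (∀ j acc s ed, min offsets.length labels.length - j ≤ k →
      flushA (((offsets.zip labels).drop j).foldl stepA (acc, some (s, ed))) =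
        (let r := innerB offsets labels (min offsets.length labels.length) ed j
         outerB offsets labels (min offsets.length labels.length) (acc ++ [(s, r.1)]) r.2)) := by
  set n := min offsets.length labels.length with hn
  induction k with
  | zero =>
    constructor
    · intro i acc hk
      have hi : n ≤ i := by omega
      rw [List.drop_eq_nil_of_le (by simp [hn]; omega), outerB]
      simp [flushA, Nat.not_lt.mpr hi]
    · intro j acc s ed hk
      have hj : n ≤ j := by omega
      rw [List.drop_eq_nil_of_le (by simp [hn]; omega), innerB, outerB]
      simp [flushA, Nat.not_lt.mpr hj]
  | succ k ih =>
    constructor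
    · intro i acc hk
      by_cases hi : i < n
      · have hio : i < offsets.length := by omega
        have hil : i < labels.length := by omega
        have hdrop : (offsets.zip labels).drop i =
            (offsets[i], labels[i]) :: (offsets.zip labels).drop (i + 1) := by
          rw [List.drop_eq_getElem_cons (by simp [hn]; omega)]
          simp
        rw [hdrop, outerB]
        simp only [hi, dif_pos]
        rw [List.getD_eq_getElem labels 0 hil, List.getD_eq_getElem offsets (0,0) hio]
        by_cases h1 : labels[i] = 1
        · rw [List.foldl_cons]
          simp only [stepA, h1]
          norm_num
          rw [(ih.2) (i + 1) acc offsets[i].1 offsets[i].2 (by omega)]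
        · by_cases h2 : labels[i] = 2
          · rw [List.foldl_cons]
            simp only [stepA, h1, h2]
            norm_num [h1]
            rw [(ih.1) (i + 1) acc (by omega)]
          · rw [List.foldl_cons]
            simp only [stepA, h1, h2]
            norm_num [h1, h2]
            rw [(ih.1) (i + 1) acc (by omega)]
      · rw [List.drop_eq_nil_of_le (by simp [hn]; omega), outerB]
        simp [flushA, hi]
    · intro j acc s ed hk
      by_cases hj : j < n
      · have hjo : j < offsets.length := by omega
        have hjl : j < labels.length := by omega
        have hdrop : (offsets.zip labels).drop j =
            (offsets[j], labels[j]) :: (offsets.zip labels).drop (j + 1) := by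
          rw [List.drop_eq_getElem_cons (by simp [hn]; omega)]
          simp
        rw [hdrop]
        by_cases h2 : labels[j] = 2
        · have h1 : labels[j] ≠ 1 := by omega
          rw [List.foldl_cons]
          simp only [stepA, h1, h2]
          norm_num
          rw [(ih.2) (j + 1) acc s offsets[j].2 (by omega)]
          have hc : j < n ∧ labels.getD j 0 = 2 := by
            refine ⟨hj, ?_⟩
            rw [List.getD_eq_getElem labels 0 hjl]; exact h2
          conv_rhs => rw [innerB, dif_pos hc]
          rw [List.getD_eq_getElem offsets (0,0) hjo]
        · have hinner : innerB offsets labels n ed j = (ed, j) := by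
            rw [innerB]
            have hc : ¬ (j < n ∧ labels.getD j 0 = 2) := by
              rw [List.getD_eq_getElem labels 0 hjl]
              tauto
            simp only [hc, dif_neg, not_false_iff]
          rw [hinner]
          conv_rhs => rw [outerB]
          simp only [hj, dif_pos]
          rw [List.getD_eq_getElem labels 0 hjl, List.getD_eq_getElem offsets (0,0) hjo]
          by_cases h1 : labels[j] = 1
          · rw [List.foldl_cons]
            simp only [stepA, h1]
            norm_num
            rw [(ih.2) (j + 1) (acc ++ [(s, ed)]) offsets[j].1 offsets[j].2 (by omega)]
            simp [List.append_assoc]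
          · rw [List.foldl_cons]
            simp only [stepA, h1, h2]
            norm_num [h1, h2]
            rw [(ih.1) (j + 1) (acc ++ [(s, ed)]) (by omega)]
      · rw [List.drop_eq_nil_of_le (by simp [hn]; omega), innerB, outerB]
        simp [flushA, hj]

-- ===== VERDICT (by name: the statement is the Claim_ definition above) =====
theorem validate_bio_roundtrip_spec : Claim_equal_validate_bio_roundtrip := by
  intro text spans encoding offsets _ hpre
  unfold Spec_validate_bio_roundtrip validate_bio_roundtrip validate_bio_roundtrip_alt
  unfold Pre_validate_bio_roundtrip at hpre
  cases hlk : List.lookup "labels" encoding with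
  | none => rw [hlk] at hpre
  | some labels =>
    have h := (scan_corr offsets labels (min offsets.length labels.length)).1 0 [] (by omega)
    simp only [List.drop_zero] at h
    show (flushA ((offsets.zip labels).foldl stepA ([], none)) == spans) =
      (outerB offsets labels (min offsets.length labels.length) [] 0 == spans)
    rw [h]
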